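-- pv_equiv track=rewrite | github.com/SandraTang/MIT-6.009 | pset5/lab.py | rule_3
-- ===== SOURCE A (Python) =====
-- def groupings(students, n):
--     """
--     Returns all possible groupings of students.
--     """
--     if n == 0:
--         return [[]]
--     if len(students) == 0:
--         return []
--     add_student = [students[0]]
--     rest_students = students[1:]
--     new_grouping = [add_student + rest for rest in groupings(rest_students, n-1)]
--     return new_grouping + groupings(rest_students, n)
--
-- def rule_3(student_preferences, session_capacities):
--     """
--     No session has more assigned students than it can fit.
--     """
--     students = list(student_preferences.keys())
--     rule = []
--     for session, capacity in session_capacities.items():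
--         if capacity < len(students):
--             groups = groupings(students, capacity+1)
--             for chunk in groups:
--                 for index in range(len(chunk)):
--                     # chunk[index] is currently student's name
--                     chunk[index] = (chunk[index] + '_' + session, False)
--             rule = rule + groups
--     return rule
-- ===== SOURCE B (Python) =====
-- def _over_capacity_groups(students, r):
--     """All r-subsets of students in lexicographic order, computed without
--     recursion: a size-indexed DP table (table[k] = k-subsets of the suffix
--     processed so far) filled while sweeping the student list right-to-left."""
--     if r < 0:
--         return []
--     table = [[[]]] + [[] for _ in range(r)]
--     for s in reversed(students):
--         table = [table[0]] + [[[s] + t for t in prev] + cur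
--                               for prev, cur in zip(table, table[1:])]
--     return table[r]
--
-- def rule_3(student_preferences, session_capacities):
--     """
--     No session has more assigned students than it can fit.
--     """
--     students = list(student_preferences.keys())
--     return [[(name + '_' + session, False) for name in combo]
--             for session, capacity in session_capacities.items()
--             if capacity < len(students)
--             for combo in _over_capacity_groups(students, capacity + 1)]
-- ===== Notes on version B (the rewrite author's own statement) =====
-- stated objective: alternative
-- what changed: Replaces the include/exclude binary recursion `groupings` with a non-recursive size-indexed dynamic-programming table swept once right-to-left over the student list (table[k] = k-subsets of the processed suffix), and builds the clause list with a single comprehension instead of repeated list concatenation and in-place chunk mutation.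
import Mathlib
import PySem

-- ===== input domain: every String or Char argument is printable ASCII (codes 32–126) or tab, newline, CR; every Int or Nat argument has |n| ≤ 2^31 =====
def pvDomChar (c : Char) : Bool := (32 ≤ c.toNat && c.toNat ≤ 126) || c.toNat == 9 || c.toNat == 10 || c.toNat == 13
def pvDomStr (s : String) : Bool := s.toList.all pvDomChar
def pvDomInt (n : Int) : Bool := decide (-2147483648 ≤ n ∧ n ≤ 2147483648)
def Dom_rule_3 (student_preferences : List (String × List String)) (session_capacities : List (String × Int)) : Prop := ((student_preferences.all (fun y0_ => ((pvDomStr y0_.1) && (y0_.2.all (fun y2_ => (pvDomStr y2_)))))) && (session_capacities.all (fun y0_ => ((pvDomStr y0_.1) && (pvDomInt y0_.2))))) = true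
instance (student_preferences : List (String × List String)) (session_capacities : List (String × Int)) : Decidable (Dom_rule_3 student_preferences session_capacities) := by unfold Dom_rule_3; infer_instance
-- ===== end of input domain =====

-- B replaces the include/exclude recursion `groupings` with a non-recursive size-indexed
-- DP table swept right-to-left over the student list, and builds the clause list as one
-- comprehension (flatMap) instead of repeated list concatenation (objective: alternative).


-- ===== PORT A =====
-- groupings(students, n): include-the-first-student branch ++ exclude-it branch
def groupings (students : List String) (n : Int) : List (List String) :=
  if n = 0 then [[]]
  else
    match students with
    | [] => []
    | add_student :: rest_students =>
        ((groupings rest_students (n - 1)).map (fun rest => [add_student] ++ rest))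
          ++ groupings rest_students n
termination_by students.length

def rule_3 (student_preferences : List (String × List String)) (session_capacities : List (String × Int)) : List (List (String × Bool)) :=
  let students := (PySem.Dict.ofList student_preferences).keys
  (PySem.Dict.ofList session_capacities).items.foldl
    (fun rule p =>
      if p.2 < (students.length : Int) then
        -- 'for index in range(len(chunk)): chunk[index] = (chunk[index] + '_' + session, False)'
        -- rewrites every element in place: ported as the element-wise map over the chunk.
        rule ++ (groupings students (p.2 + 1)).map
          (fun chunk => chunk.map (fun name => (name ++ "_" ++ p.1, false)))
      else rule) []

-- ===== PORT B =====
-- one sweep step: table ↦ [table[0]] + [ [s]+t for t in prev] + cur | (prev,cur) ∈ zip(table, table[1:]) ]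
-- (table is never empty — it has length r+1 throughout — so headD [] is exact for Python's table[0])
def stepTable (s : String) (table : List (List (List String))) : List (List (List String)) :=
  (table.headD []) ::
    List.zipWith (fun prev cur => (prev.map (fun t => [s] ++ t)) ++ cur) table table.tail

-- _over_capacity_groups(students, r): DP table, table[k] = k-subsets of the processed suffix
def overCapacityGroups (students : List String) (r : Int) : List (List String) :=
  if r < 0 then []
  else
    -- 'for s in reversed(students): table = …' is a right fold of stepTable
    -- Python's final table[r] never goes out of range (the table keeps length r+1): getD is exact
    (students.foldr stepTable ([[]] :: List.replicate r.toNat [])).getD r.toNat []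

def rule_3_alt (student_preferences : List (String × List String)) (session_capacities : List (String × Int)) : List (List (String × Bool)) :=
  let students := (PySem.Dict.ofList student_preferences).keys
  (PySem.Dict.ofList session_capacities).items.flatMap
    (fun p =>
      if p.2 < (students.length : Int) then
        (overCapacityGroups students (p.2 + 1)).map
          (fun combo => combo.map (fun name => (name ++ "_" ++ p.1, false)))
      else [])

-- ===== PRECONDITION & SPEC =====
def Spec_rule_3 (student_preferences : List (String × List String)) (session_capacities : List (String × Int)) (out : List (List (String × Bool))) : Prop := out = rule_3_alt student_preferences session_capacities
instance (student_preferences : List (String × List String)) (session_capacities : List (String × Int)) (out : List (List (String × Bool))) : Decidable (Spec_rule_3 student_preferences session_capacities out) := by unfold Spec_rule_3; infer_instance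

-- ===== CLAIM (what is proved, stated in full; the proofs are below) =====
def Claim_equal_rule_3 : Prop := ∀ (student_preferences : List (String × List String)) (session_capacities : List (String × Int)), Dom_rule_3 student_preferences session_capacities → Spec_rule_3 student_preferences session_capacities (rule_3 student_preferences session_capacities)

-- ===== LEMMAS AND PROOFS =====

lemma groupings_neg (s : List String) (n : Int) (h : n < 0) : groupings s n = [] := by
  induction s generalizing n with
  | nil => unfold groupings; simp [show n ≠ 0 by omega]
  | cons x xs ih =>
      unfold groupings
      simp [show n ≠ 0 by omega, ih (n - 1) (by omega), ih n h]

lemma zip_tail {α β : Type} (h : α → α → β) (f : Nat → α) (r : Nat) :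
    List.zipWith h ((List.range (r+1)).map f) (((List.range (r+1)).map f).tail)
      = (List.range r).map (fun k => h (f k) (f (k+1))) := by
  induction r generalizing f with
  | zero => simp
  | succ r ih =>
      rw [List.range_succ_eq_map (n := r+1)]
      simp only [List.map_cons, List.map_map, List.tail_cons]
      have h2 := List.range_succ_eq_map (n := r)
      rw [h2]
      simp only [List.map_cons, List.map_map, List.zipWith_cons_cons]
      congr 1
      have := ih (f ∘ Nat.succ)
      rw [h2] at this
      simp only [List.map_cons, List.map_map, List.tail_cons] at this
      simpa [Function.comp] using this

lemma range_map_groupings_nil (r : Nat) :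
    (List.range (r + 1)).map (fun (k : Nat) => groupings [] (k : Int)) = [[]] :: List.replicate r [] := by
  induction r with
  | zero => simp [groupings]
  | succ r ih =>
      rw [List.range_succ, List.map_append, ih]
      have h0 : groupings [] ((r : Int) + 1) = [] := by
        unfold groupings; simp [show ((r : Int) + 1) ≠ 0 by omega]
      simp [h0, List.replicate_succ']

-- the table after sweeping `s` is exactly [groupings s 0, …, groupings s r]
lemma foldr_stepTable (s : List String) (r : Nat) :
    s.foldr stepTable ([[]] :: List.replicate r []) =
      (List.range (r + 1)).map (fun (k : Nat) => groupings s (k : Int)) := by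
  induction s with
  | nil => rw [List.foldr_nil, range_map_groupings_nil]
  | cons x xs ih =>
      rw [List.foldr_cons, ih]
      unfold stepTable
      rw [zip_tail]
      rw [List.range_succ_eq_map (n := r)]
      simp only [List.map_cons, List.map_map]
      congr 1
      · simp only [List.headD_cons]
        unfold groupings; simp
      · apply List.map_congr_left
        intro k _
        simp only [Function.comp]
        conv_rhs => rw [groupings]
        have hne : ((k + 1 : Nat) : Int) ≠ 0 := by omega
        have harith : ((k + 1 : Nat) : Int) - 1 = (k : Int) := by omega
        rw [if_neg hne]
        rw [harith]

lemma overCapacityGroups_eq (s : List String) (n : Int) :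
    overCapacityGroups s n = groupings s n := by
  unfold overCapacityGroups
  by_cases h : n < 0
  · rw [if_pos h, groupings_neg s n h]
  · rw [if_neg h, foldr_stepTable]
    have hn : ((n.toNat : Nat) : Int) = n := Int.toNat_of_nonneg (by omega)
    rw [List.getD_eq_getElem?_getD]
    simp [hn]

lemma rule3_fold (students : List String) (l : List (String × Int))
    (acc : List (List (String × Bool))) :
    l.foldl (fun rule p =>
        if p.2 < (students.length : Int) then
          rule ++ (groupings students (p.2 + 1)).map
            (fun chunk => chunk.map (fun name => (name ++ "_" ++ p.1, false)))
        else rule) acc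
      = acc ++ l.flatMap (fun p =>
          if p.2 < (students.length : Int) then
            (overCapacityGroups students (p.2 + 1)).map
              (fun combo => combo.map (fun name => (name ++ "_" ++ p.1, false)))
          else []) := by
  induction l generalizing acc with
  | nil => simp
  | cons p l ih =>
      simp only [List.foldl_cons, List.flatMap_cons]
      rw [ih]
      by_cases h : p.2 < (students.length : Int)
      · rw [if_pos h, if_pos h, overCapacityGroups_eq]
        simp
      · rw [if_neg h, if_neg h]
        simp

-- ===== VERDICT (by name: the statement is the Claim_ definition above) =====
theorem rule_3_spec : Claim_equal_rule_3 := by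
  intro sp sc _
  unfold Spec_rule_3 rule_3 rule_3_alt
  dsimp only
  rw [rule3_fold]
  simp
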